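-- pv_equiv track=rewrite | github.com/ToxikSkrrt/COURS | Fac/L2/Premier semestre/Combi, Proba, Stats/TM 1/tm1.py | EntierVersBinaire
-- ===== SOURCE A (Python) =====
-- def EntierVersBinaire(k,n):
--     if not(n > 0 and n < 2 ** k - 1):
--         return None
--     codeB = k * [0]
--     for i in range(k):
--         index = 2 ** (k - 1 - i)
--         if n >= index:
--             codeB[i] = 1
--             n -= index
--     return tuple(codeB)
-- ===== SOURCE B (Python) =====
-- def EntierVersBinaire(k, n):
--     if not(n > 0 and n < 2 ** k - 1):
--         return None
--     bits = []
--     while n > 0: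
--         bits.append(n % 2)
--         n //= 2
--     bits.reverse()
--     return tuple([0] * (k - len(bits)) + bits)
-- ===== Notes on version B (the rewrite author's own statement) =====
-- stated objective: alternative
-- what changed: B extracts bits from the low end by repeated divmod-by-2 (while n>0), then reverses and left-pads with zeros to k bits, instead of A's MSB-first greedy subtraction against precomputed descending powers of two over a fixed k-iteration loop.
import Mathlib
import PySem

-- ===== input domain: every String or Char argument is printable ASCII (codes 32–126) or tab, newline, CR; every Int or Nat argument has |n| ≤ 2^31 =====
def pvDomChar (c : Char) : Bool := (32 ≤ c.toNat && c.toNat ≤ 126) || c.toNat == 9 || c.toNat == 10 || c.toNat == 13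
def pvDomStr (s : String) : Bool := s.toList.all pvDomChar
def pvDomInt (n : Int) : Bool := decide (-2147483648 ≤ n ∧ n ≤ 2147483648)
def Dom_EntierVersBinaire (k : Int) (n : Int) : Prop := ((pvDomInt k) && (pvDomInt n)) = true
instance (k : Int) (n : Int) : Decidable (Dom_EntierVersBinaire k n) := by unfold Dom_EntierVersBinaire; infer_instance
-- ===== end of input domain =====

-- B re-implements the conversion by low-end bit extraction (repeated divmod 2, reverse, pad)
-- instead of A's MSB-first greedy subtraction of descending powers of two; same return value.

-- ===== PORT A =====
-- A's loop 'for i in range(k)': iteration i compares n against 2**(k-1-i); ported as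
-- structural recursion on the number of remaining iterations m = k - i (so the weight is 2^m
-- with m+1 iterations remaining), building the list in the same order the loop fills codeB.
def pvGoA : Nat → Int → List Int
  | 0, _ => []
  | m + 1, n =>
      if n ≥ 2 ^ m then 1 :: pvGoA m (n - 2 ^ m) else 0 :: pvGoA m n

-- Guard 'n > 0 and n < 2**k - 1': for k < 0 Python's 2**k is a float in (0,1], so with n > 0
-- the guard is false exactly as with 2^k.toNat - 1 = 0 here; for k ≥ 0 it is the same integer test.
def EntierVersBinaire (k : Int) (n : Int) : Option (List Int) :=
  if 0 < n ∧ n < 2 ^ k.toNat - 1 then some (pvGoA k.toNat n) else none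

-- ===== PORT B =====
-- 'while n > 0: bits.append(n % 2); n //= 2'
def pvBitsLow (n : Int) : List Int :=
  if h : 0 < n then
    PySem.Int.mod n 2 :: pvBitsLow (PySem.Int.floordiv n 2)
  else []
termination_by n.toNat
decreasing_by
  rw [PySem.Int.floordiv_eq_ediv_of_pos (by omega : (0:Int) < 2)]
  omega

-- guard ported exactly as in A (B's Python keeps it verbatim)
def EntierVersBinaire_alt (k : Int) (n : Int) : Option (List Int) :=
  if 0 < n ∧ n < 2 ^ k.toNat - 1 then
    let bits := (pvBitsLow n).reverse
    some (List.replicate (k.toNat - bits.length) 0 ++ bits)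
  else none

-- ===== PRECONDITION & SPEC =====
def Spec_EntierVersBinaire (k : Int) (n : Int) (out : Option (List Int)) : Prop := out = EntierVersBinaire_alt k n
instance (k : Int) (n : Int) (out : Option (List Int)) : Decidable (Spec_EntierVersBinaire k n out) := by unfold Spec_EntierVersBinaire; infer_instance

-- ===== CLAIM (what is proved, stated in full; the proofs are below) =====
def Claim_equal_EntierVersBinaire : Prop := ∀ (k : Int) (n : Int), Dom_EntierVersBinaire k n → Spec_EntierVersBinaire k n (EntierVersBinaire k n)

-- ===== LEMMAS AND PROOFS =====

theorem pvBitsLow_zero : pvBitsLow 0 = [] := by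
  rw [pvBitsLow]; simp

theorem pvBitsLow_len_le (m : Nat) : ∀ n : Int, 0 ≤ n → n < 2 ^ m → (pvBitsLow n).length ≤ m := by
  induction m with
  | zero =>
      intro n h0 h1
      have : n = 0 := by omega
      subst this; simp [pvBitsLow_zero]
  | succ m ih =>
      intro n h0 h1
      by_cases hn : 0 < n
      · rw [pvBitsLow, dif_pos hn,
          PySem.Int.floordiv_eq_ediv_of_pos (by omega : (0:Int) < 2)]
        have hp : (2:Int) ^ (m + 1) = 2 ^ m * 2 := by ring
        have := ih (n / 2) (by omega) (by omega)
        simpa using this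
      · have : n = 0 := by omega
        subst this; simp [pvBitsLow_zero]

theorem pvBitsLow_add_pow (m : Nat) :
    ∀ n : Int, 0 ≤ n → n < 2 ^ m →
      pvBitsLow (n + 2 ^ m) =
        pvBitsLow n ++ (List.replicate (m - (pvBitsLow n).length) 0 ++ [1]) := by
  induction m with
  | zero =>
      intro n h0 h1
      have hn0 : n = 0 := by omega
      subst hn0
      rw [show (0:Int) + 2 ^ 0 = 1 from by norm_num, pvBitsLow,
        dif_pos (by norm_num : (0:Int) < 1),
        show PySem.Int.mod 1 2 = 1 from by decide,
        show PySem.Int.floordiv 1 2 = 0 from by decide]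
      simp [pvBitsLow_zero]
  | succ m ih =>
      intro n h0 h1
      have hp : (0:Int) < 2 ^ m := by positivity
      have hpow : (2:Int) ^ (m + 1) = 2 ^ m * 2 := by ring
      have hpos : 0 < n + 2 ^ (m + 1) := by omega
      rw [pvBitsLow, dif_pos hpos,
        PySem.Int.mod_eq_emod_of_pos (by omega : (0:Int) < 2),
        PySem.Int.floordiv_eq_ediv_of_pos (by omega : (0:Int) < 2)]
      have hq : (n + 2 ^ (m + 1)) / 2 = n / 2 + 2 ^ m := by omega
      have hr : (n + 2 ^ (m + 1)) % 2 = n % 2 := by omega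
      rw [hq, hr]
      by_cases hn : 0 < n
      · have ihh := ih (n / 2) (by omega) (by omega)
        rw [ihh]
        conv_rhs => rw [pvBitsLow, dif_pos hn,
          PySem.Int.mod_eq_emod_of_pos (by omega : (0:Int) < 2),
          PySem.Int.floordiv_eq_ediv_of_pos (by omega : (0:Int) < 2)]
        simp
      · have : n = 0 := by omega
        subst this
        have ihh := ih 0 (by omega) (by omega)
        simp [pvBitsLow_zero] at ihh ⊢
        rw [ihh]
        simp [List.replicate_succ]

theorem pvGoA_eq (m : Nat) :
    ∀ n : Int, 0 ≤ n → n < 2 ^ m →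
      pvGoA m n = List.replicate (m - (pvBitsLow n).length) 0 ++ (pvBitsLow n).reverse := by
  induction m with
  | zero =>
      intro n h0 h1
      have : n = 0 := by omega
      subst this; simp [pvGoA, pvBitsLow_zero]
  | succ m ih =>
      intro n h0 h1
      have hp : (0:Int) < 2 ^ m := by positivity
      have hpow : (2:Int) ^ (m + 1) = 2 ^ m * 2 := by ring
      by_cases hge : n ≥ 2 ^ m
      · have h0' : 0 ≤ n - 2 ^ m := by omega
        have h1' : n - 2 ^ m < 2 ^ m := by omega
        have hlen' := pvBitsLow_len_le m (n - 2 ^ m) h0' h1'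
        have hadd := pvBitsLow_add_pow m (n - 2 ^ m) h0' h1'
        have hsub : n - 2 ^ m + 2 ^ m = n := by ring
        rw [hsub] at hadd
        rw [pvGoA, if_pos hge, ih (n - 2 ^ m) h0' h1', hadd]
        simp
        omega
      · have hlen := pvBitsLow_len_le m n h0 (by omega)
        rw [pvGoA, if_neg hge, ih n h0 (by omega)]
        have : m + 1 - (pvBitsLow n).length = (m - (pvBitsLow n).length) + 1 := by omega
        rw [this, List.replicate_succ]
        simp

-- ===== VERDICT (by name: the statement is the Claim_ definition above) =====
theorem EntierVersBinaire_spec : Claim_equal_EntierVersBinaire := by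
  intro k n _
  unfold Spec_EntierVersBinaire EntierVersBinaire EntierVersBinaire_alt
  by_cases h : 0 < n ∧ n < 2 ^ k.toNat - 1
  · rw [if_pos h, if_pos h]
    have hlt : n < 2 ^ k.toNat := by
      have := h.2; omega
    rw [pvGoA_eq k.toNat n (le_of_lt h.1) hlt]
    simp
  · rw [if_neg h, if_neg h]
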